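-- pv_equiv track=rewrite | github.com/pnnl/NWHypergraph | python/pow_law_generator.py | hist_to_stubs
-- ===== SOURCE A (Python) =====
-- def hist_to_stubs(degree_histogram):
--     stubs = list()
--     n = 0
--     for k, v in degree_histogram.items():
--         for vdx in range(n, n + v):
--             stubs += [vdx] * k
--         n += v
--     return n, stubs
-- ===== SOURCE B (Python) =====
-- def hist_to_stubs(degree_histogram):
--     items = list(degree_histogram.items())
--     offsets = []
--     n = 0
--     for _, v in items:
--         offsets.append(n)
--         n += v
--     stubs = [s + j // k
--              for (k, v), s in zip(items, offsets)
--              if k > 0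
--              for j in range(k * v)]
--     return n, stubs
-- ===== Notes on version B (the rewrite author's own statement) =====
-- stated objective: alternative
-- what changed: Instead of A's nested loop that appends each node index repeated k times ([vdx]*k) with an interleaved running counter, B first builds the start-offset table by a prefix-sum pass and then generates each entry's block purely arithmetically as [s + j // k for j in range(k*v)], so no element-repetition construct appears at all.
import Mathlib
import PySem

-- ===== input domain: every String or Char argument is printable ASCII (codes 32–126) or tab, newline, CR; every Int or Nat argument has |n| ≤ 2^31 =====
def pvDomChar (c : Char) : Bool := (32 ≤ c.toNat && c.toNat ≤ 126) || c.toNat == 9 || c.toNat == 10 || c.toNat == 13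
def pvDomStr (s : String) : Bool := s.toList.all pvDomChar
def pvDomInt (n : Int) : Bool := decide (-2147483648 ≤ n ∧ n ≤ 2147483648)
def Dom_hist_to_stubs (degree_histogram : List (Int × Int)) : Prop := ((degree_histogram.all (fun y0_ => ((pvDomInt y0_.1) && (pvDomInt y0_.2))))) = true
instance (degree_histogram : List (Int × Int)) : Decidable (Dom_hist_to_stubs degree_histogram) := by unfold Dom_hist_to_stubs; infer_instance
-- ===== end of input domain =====

-- B replaces A's repeat-each-index emission by a prefix-sum offsets pass plus arithmetic generation: each entry's block is produced as [s + j // k for j in range(k*v)] (floor-division indexing), no element repetition; objective: alternative decomposition, same cost.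


-- ===== PORT A =====
-- state (stubs, n); 'for vdx in range(n, n + v): stubs += [vdx] * k' then 'n += v'
def hist_to_stubs (degree_histogram : List (Int × Int)) : Int × List Int :=
  let res := degree_histogram.foldl
    (fun (st : List Int × Int) kv =>
      ((PySem.List.pyRange st.2 (st.2 + kv.2) 1).foldl
         (fun s vdx => s ++ List.replicate kv.1.toNat vdx) st.1,
       st.2 + kv.2))
    ([], 0)
  (res.2, res.1)

-- ===== PORT B =====
-- offsets built by one prefix-sum loop; stubs = [s + j // k for (k,v),s in zip(items,offsets) if k > 0 for j in range(k*v)]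
def hist_to_stubs_alt (degree_histogram : List (Int × Int)) : Int × List Int :=
  let items := degree_histogram
  let p := items.foldl (fun (q : List Int × Int) kv => (q.1 ++ [q.2], q.2 + kv.2)) ([], 0)
  let offsets := p.1
  let n := p.2
  let stubs := (items.zip offsets).flatMap
    (fun x => if 0 < x.1.1 then
        (PySem.List.pyRange 0 (x.1.1 * x.1.2) 1).map (fun j => x.2 + PySem.Int.floordiv j x.1.1)
      else [])
  (n, stubs)

-- ===== PRECONDITION & SPEC =====
-- A is total (dict iteration, range, list repetition never raise): no Pre_.
def Spec_hist_to_stubs (degree_histogram : List (Int × Int)) (out : Int × List Int) : Prop := out = hist_to_stubs_alt degree_histogram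
instance (degree_histogram : List (Int × Int)) (out : Int × List Int) : Decidable (Spec_hist_to_stubs degree_histogram out) := by unfold Spec_hist_to_stubs; infer_instance

-- ===== CLAIM (what is proved, stated in full; the proofs are below) =====
def Claim_equal_hist_to_stubs : Prop := ∀ (degree_histogram : List (Int × Int)), Dom_hist_to_stubs degree_histogram → Spec_hist_to_stubs degree_histogram (hist_to_stubs degree_histogram)

-- ===== LEMMAS AND PROOFS =====

-- the stubs, as a structural recursion over the entries with a running offset
def pvStubs : List (Int × Int) → Int → List Int
  | [], _ => []
  | kv :: t, c =>
      (PySem.List.pyRange c (c + kv.2) 1).flatMap (fun i => List.replicate kv.1.toNat i)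
        ++ pvStubs t (c + kv.2)

-- the prefix offsets B's first pass produces
def pvStarts : List (Int × Int) → Int → List Int
  | [], _ => []
  | kv :: t, c => c :: pvStarts t (c + kv.2)

theorem pvA_fold (h : List (Int × Int)) (s0 : List Int) (c : Int) :
    h.foldl
      (fun (st : List Int × Int) kv =>
        ((PySem.List.pyRange st.2 (st.2 + kv.2) 1).foldl
           (fun s vdx => s ++ List.replicate kv.1.toNat vdx) st.1,
         st.2 + kv.2))
      (s0, c)
      = (s0 ++ pvStubs h c, c + (h.map (·.2)).sum) := by
  induction h generalizing s0 c with
  | nil => simp [pvStubs]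
  | cons kv t ih =>
      simp only [List.foldl_cons]
      rw [ih, PySem.List.foldl_append_eq_flatMap]
      simp only [pvStubs, List.map_cons, List.sum_cons, List.append_assoc, Prod.mk.injEq]
      exact ⟨trivial, by ring⟩

theorem pvB_starts (h : List (Int × Int)) (l0 : List Int) (c : Int) :
    h.foldl (fun (q : List Int × Int) kv => (q.1 ++ [q.2], q.2 + kv.2)) (l0, c)
      = (l0 ++ pvStarts h c, c + (h.map (·.2)).sum) := by
  induction h generalizing l0 c with
  | nil => simp [pvStarts]
  | cons kv t ih =>
      simp only [List.foldl_cons, ih, pvStarts, List.map_cons, List.sum_cons,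
        List.append_assoc, List.singleton_append, Prod.mk.injEq]
      exact ⟨trivial, by ring⟩

-- the Nat core: j ↦ j / k over range (k*v) enumerates each node index repeated k times
theorem pvNatBlock (kn : Nat) (hk : 0 < kn) (vn : Nat) (s : Int) :
    (List.range (kn * vn)).map (fun j => s + ((j / kn : Nat) : Int))
      = (List.range vn).flatMap (fun i : Nat => List.replicate kn (s + (i : Int))) := by
  induction vn with
  | zero => simp
  | succ m ih =>
      rw [Nat.mul_succ, List.range_add, List.map_append, ih, List.range_succ,
        List.flatMap_append, List.flatMap_cons, List.flatMap_nil]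
      congr 1
      rw [List.map_map,
        show ((fun j => s + ((j / kn : Nat) : Int)) ∘ fun x => kn * m + x)
            = fun r => s + (((kn * m + r) / kn : Nat) : Int) from rfl]
      have hpt : ∀ r ∈ List.range kn,
          s + (((kn * m + r) / kn : Nat) : Int) = s + (m : Int) := by
        intro r hr
        simp only [List.mem_range] at hr
        rw [Nat.mul_add_div hk, Nat.div_eq_of_lt hr, Nat.add_zero]
      rw [List.map_congr_left hpt]
      simp [List.map_const']

-- one entry's block: B's floor-division generation = A's repeat-each-index expansion
theorem pvBlock (k v s : Int) :
    (if 0 < k then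
        (PySem.List.pyRange 0 (k * v) 1).map (fun j => s + PySem.Int.floordiv j k)
      else [])
      = (PySem.List.pyRange s (s + v) 1).flatMap (fun i => List.replicate k.toNat i) := by
  by_cases hk : 0 < k
  · simp only [if_pos hk]
    by_cases hv : 0 < v
    · rw [PySem.List.pyRange_one 0 (k * v), PySem.List.pyRange_one s (s + v)]
      rw [List.map_map, List.flatMap_map]
      obtain ⟨kn, rfl⟩ : ∃ kn : Nat, k = (kn : Int) := ⟨k.toNat, by omega⟩
      obtain ⟨vn, rfl⟩ : ∃ vn : Nat, v = (vn : Int) := ⟨v.toNat, by omega⟩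
      have hkn : 0 < kn := by exact_mod_cast hk
      have h1 : ((kn : Int) * vn - 0).toNat = kn * vn := by
        rw [Int.sub_zero, ← Int.natCast_mul, Int.toNat_natCast]
      have h2 : (s + vn - s).toNat = vn := by omega
      simp only [h1, h2, Int.toNat_natCast]
      rw [← pvNatBlock kn hkn vn s]
      apply List.map_congr_left
      intro j _
      simp [PySem.Int.floordiv_natCast]
    · have hv' : v ≤ 0 := by omega
      have h1 : k * v ≤ 0 := mul_nonpos_of_nonneg_of_nonpos (le_of_lt hk) hv'
      rw [PySem.List.pyRange_one_eq_nil h1,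
        PySem.List.pyRange_one_eq_nil (by omega : s + v ≤ s)]
      simp
  · have : k.toNat = 0 := by omega
    simp [hk, this]

-- B's flatMap over the zipped offsets equals the recursive spec
theorem pvB_stubs (h : List (Int × Int)) (c : Int) :
    (h.zip (pvStarts h c)).flatMap
      (fun x => if 0 < x.1.1 then
          (PySem.List.pyRange 0 (x.1.1 * x.1.2) 1).map (fun j => x.2 + PySem.Int.floordiv j x.1.1)
        else [])
      = pvStubs h c := by
  induction h generalizing c with
  | nil => simp [pvStarts, pvStubs]
  | cons kv t ih =>
      simp only [pvStarts, pvStubs, List.zip_cons_cons, List.flatMap_cons, ih]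
      rw [pvBlock kv.1 kv.2 c]

-- ===== VERDICT (by name: the statement is the Claim_ definition above) =====
theorem hist_to_stubs_spec : Claim_equal_hist_to_stubs := by
  intro h _
  unfold Spec_hist_to_stubs hist_to_stubs hist_to_stubs_alt
  simp only [pvA_fold h [] 0, pvB_starts h [] 0, List.nil_append]
  simp [pvB_stubs h 0]
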